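-- pv_equiv track=rewrite | github.com/john-chang-8484/sat | makecnf.py | makecnf
-- ===== SOURCE A (Python) =====
-- def clause2str(clause, varmap):
--     """ Convert a given clause to a string. """
--     nums = []
--     for v in clause:
--         if v[0] == '~':
--             nums.append(str(-varmap[v[1:]]))
--         else:
--             nums.append(str(varmap[v]))
--     nums.append('0')
--     return ' '.join(nums)
--
-- def makecnf(clauses):
--     """ Make a cnf string from clauses """
--     varmap = {}
--     counter = 1
--     for clause in clauses:
--         for var in clause:
--             varnm = ( var[1:] if var[0] == '~' else var )
--             if varnm not in varmap:
--                 varmap[varnm] = counter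
--                 counter += 1
--     lines = ['p cnf %d %d' % (len(varmap), len(clauses))]
--     for clause in clauses:
--         lines.append(clause2str(clause, varmap))
--     return '\n'.join(lines), varmap
-- ===== SOURCE B (Python) =====
-- def makecnf(clauses):
--     """ Make a cnf string from clauses (single pass: number variables and format lines together). """
--     varmap = {}
--     body = []
--     for clause in clauses:
--         nums = []
--         for var in clause:
--             neg = var[0] == '~'
--             name = var[1:] if neg else var
--             if name not in varmap:
--                 varmap[name] = len(varmap) + 1
--             n = varmap[name]
--             nums.append(str(-n if neg else n))
--         nums.append('0')
--         body.append(' '.join(nums))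
--     header = 'p cnf %d %d' % (len(varmap), len(clauses))
--     return '\n'.join([header] + body), varmap
-- ===== Notes on version B (the rewrite author's own statement) =====
-- stated objective: simpler
-- what changed: A makes two passes over the clauses (one to build the variable numbering, then a separate formatting pass through the clause2str helper); B makes a single pass that numbers each variable on first sight with len(varmap)+1 and formats each clause line inline as it goes, with no separate formatting helper.
import Mathlib
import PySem

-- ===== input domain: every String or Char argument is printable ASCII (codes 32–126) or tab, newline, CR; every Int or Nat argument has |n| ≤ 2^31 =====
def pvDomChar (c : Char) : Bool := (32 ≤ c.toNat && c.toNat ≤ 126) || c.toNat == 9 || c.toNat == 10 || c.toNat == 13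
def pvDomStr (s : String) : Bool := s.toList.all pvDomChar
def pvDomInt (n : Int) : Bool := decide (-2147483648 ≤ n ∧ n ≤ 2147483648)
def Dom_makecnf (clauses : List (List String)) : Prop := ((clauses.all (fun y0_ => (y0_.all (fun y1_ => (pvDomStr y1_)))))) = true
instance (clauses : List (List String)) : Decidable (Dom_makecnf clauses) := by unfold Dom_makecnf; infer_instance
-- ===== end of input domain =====

-- B replaces A's two passes over the clauses (number variables, then format) by one pass that
-- numbers each new variable with len(varmap)+1 and formats the clause line as it goes (objective: simpler, one pass).

-- ===== PORT A =====
-- A's clause2str: varmap[v] raises KeyError only for keys absent from varmap; under Pre_ every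
-- key looked up was inserted by makecnf's first loop, so the getD default 0 below never fires.
def clause2str (clause : List String) (varmap : PySem.Dict String Int) : String :=
  let nums := clause.foldl (fun nums v =>
      if PySem.Str.pyGet? v 0 = some '~' then
        nums ++ [PySem.Int.toStr (-(varmap.getD (PySem.Str.slice v (some 1) none) 0))]
      else
        nums ++ [PySem.Int.toStr (varmap.getD v 0)]) ([] : List String)
  PySem.Str.join " " (nums ++ ["0"])

-- one step of A's first loop body (the inner 'for var in clause')
def passStep (st : PySem.Dict String Int × Int) (var : String) : PySem.Dict String Int × Int :=
  let varnm := if PySem.Str.pyGet? var 0 = some '~' then PySem.Str.slice var (some 1) none else var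
  if st.1.contains varnm then st else (st.1.insert varnm st.2, st.2 + 1)

def makecnf (clauses : List (List String)) : String × (List (String × Int)) :=
  let st := clauses.foldl (fun st clause => clause.foldl passStep st)
      ((PySem.Dict.empty : PySem.Dict String Int), (1 : Int))
  let varmap := st.1
  let lines := clauses.foldl (fun lines clause => lines ++ [clause2str clause varmap])
      ["p cnf " ++ PySem.Int.toStr (varmap.size : Int) ++ " " ++ PySem.Int.toStr (PySem.List.len clauses)]
  (PySem.Str.join "\n" lines, varmap.items)

-- ===== PORT B =====
-- one step of B's inner loop: number the variable if new, emit its literal string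
def bStep (q : PySem.Dict String Int × List String) (var : String) :
    PySem.Dict String Int × List String :=
  let neg := PySem.Str.pyGet? var 0 = some '~'
  let name := if neg then PySem.Str.slice var (some 1) none else var
  let vm := if q.1.contains name then q.1 else q.1.insert name ((q.1.size : Int) + 1)
  let n := vm.getD name 0
  (vm, q.2 ++ [PySem.Int.toStr (if neg then -n else n)])

-- one step of B's outer loop: process a clause, append its finished line
def bClause (st : PySem.Dict String Int × List String) (clause : List String) :
    PySem.Dict String Int × List String :=
  let p := clause.foldl bStep (st.1, ([] : List String))
  (p.1, st.2 ++ [PySem.Str.join " " (p.2 ++ ["0"])])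

def makecnf_alt (clauses : List (List String)) : String × (List (String × Int)) :=
  let st := clauses.foldl bClause ((PySem.Dict.empty : PySem.Dict String Int), ([] : List String))
  let header := "p cnf " ++ PySem.Int.toStr (st.1.size : Int) ++ " " ++ PySem.Int.toStr (PySem.List.len clauses)
  (PySem.Str.join "\n" (header :: st.2), st.1.items)

-- ===== PRECONDITION & SPEC =====
-- Pre_ excludes clauses containing an empty-string literal, on which Python A raises IndexError (var[0]).
def Pre_makecnf (clauses : List (List String)) : Prop :=
  ∀ clause ∈ clauses, ∀ v ∈ clause, v ≠ ""
instance (clauses : List (List String)) : Decidable (Pre_makecnf clauses) := by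
  unfold Pre_makecnf; infer_instance
def pvWitness_makecnf : List (List String) := [["x", "~y"], ["y", "z"]]

def Spec_makecnf (clauses : List (List String)) (out : String × (List (String × Int))) : Prop := out = makecnf_alt clauses
instance (clauses : List (List String)) (out : String × (List (String × Int))) : Decidable (Spec_makecnf clauses out) := by unfold Spec_makecnf; infer_instance

-- ===== CLAIM (what is proved, stated in full; the proofs are below) =====
def Claim_equal_makecnf : Prop := ∀ (clauses : List (List String)), Dom_makecnf clauses → Pre_makecnf clauses → Spec_makecnf clauses (makecnf clauses)

-- ===== LEMMAS AND PROOFS =====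

-- d' preserves every lookup that d already answers
def DExt (d d' : PySem.Dict String Int) : Prop :=
  ∀ k, d.contains k = true → d'.get? k = d.get? k

lemma dext_refl (d : PySem.Dict String Int) : DExt d d := fun _ _ => rfl

lemma dext_trans {a b c : PySem.Dict String Int}
    (hab : DExt a b) (hbc : DExt b c)
    (hmono : ∀ k, a.contains k = true → b.contains k = true) : DExt a c := by
  intro k hk; rw [hbc k (hmono k hk), hab k hk]

lemma contains_passStep (st : PySem.Dict String Int × Int) (var k : String)
    (h : st.1.contains k = true) : (passStep st var).1.contains k = true := by
  unfold passStep
  dsimp only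
  generalize (if PySem.Str.pyGet? var 0 = some '~' then PySem.Str.slice var (some 1) none else var) = nm
  split
  · exact h
  · rw [PySem.Dict.contains_insert]; simp [h]

lemma dext_passStep (st : PySem.Dict String Int × Int) (var : String) :
    DExt st.1 (passStep st var).1 := by
  intro k hk
  unfold passStep
  dsimp only
  generalize (if PySem.Str.pyGet? var 0 = some '~' then PySem.Str.slice var (some 1) none else var) = nm
  split
  · rfl
  · next hnc =>
      refine PySem.Dict.get?_insert_of_ne _ _ (fun hkeq => ?_)
      rw [hkeq] at hk
      exact hnc hk

lemma contains_foldl_clause (vars : List String) (st : PySem.Dict String Int × Int) (k : String)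
    (h : st.1.contains k = true) : (vars.foldl passStep st).1.contains k = true := by
  induction vars generalizing st with
  | nil => exact h
  | cons v vs ih => exact ih (passStep st v) (contains_passStep st v k h)

lemma dext_foldl_clause (vars : List String) (st : PySem.Dict String Int × Int) :
    DExt st.1 (vars.foldl passStep st).1 := by
  induction vars generalizing st with
  | nil => exact dext_refl _
  | cons v vs ih =>
      exact dext_trans (dext_passStep st v) (ih (passStep st v))
        (fun k hk => contains_passStep st v k hk)

lemma contains_foldl_clauses (cs : List (List String)) (st : PySem.Dict String Int × Int) (k : String)
    (h : st.1.contains k = true) :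
    ((cs.foldl (fun st cl => cl.foldl passStep st) st).1).contains k = true := by
  induction cs generalizing st with
  | nil => exact h
  | cons cl cs ih => exact ih _ (contains_foldl_clause cl st k h)

lemma dext_foldl_clauses (cs : List (List String)) (st : PySem.Dict String Int × Int) :
    DExt st.1 (cs.foldl (fun st cl => cl.foldl passStep st) st).1 := by
  induction cs generalizing st with
  | nil => exact dext_refl _
  | cons cl cs ih =>
      exact dext_trans (dext_foldl_clause cl st) (ih _)
        (fun k hk => contains_foldl_clause cl st k hk)

lemma getD_of_dext {d d' : PySem.Dict String Int} (h : DExt d d') {k : String}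
    (hk : d.contains k = true) : d'.getD k 0 = d.getD k 0 := by
  rw [PySem.Dict.getD_eq_get?_getD, PySem.Dict.getD_eq_get?_getD, h k hk]

-- the per-variable entry A's clause2str produces, relative to a dict
def entryA (v : String) (dfin : PySem.Dict String Int) : String :=
  if PySem.Str.pyGet? v 0 = some '~' then
    PySem.Int.toStr (-(dfin.getD (PySem.Str.slice v (some 1) none) 0))
  else PySem.Int.toStr (dfin.getD v 0)

lemma clause2str_eq_map (clause : List String) (d : PySem.Dict String Int) :
    clause2str clause d = PySem.Str.join " " (clause.map (fun v => entryA v d) ++ ["0"]) := by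
  unfold clause2str
  have hfun : (fun (nums : List String) (v : String) =>
      if PySem.Str.pyGet? v 0 = some '~' then
        nums ++ [PySem.Int.toStr (-(d.getD (PySem.Str.slice v (some 1) none) 0))]
      else nums ++ [PySem.Int.toStr (d.getD v 0)]) =
      (fun nums v => nums ++ [entryA v d]) := by
    funext nums v
    unfold entryA
    split <;> rfl
  rw [hfun, PySem.List.foldl_append_singleton_eq_map]
  simp

-- one B step produces A's dict (with counter = size + 1) and the entry A would format
lemma bStep_spec (d : PySem.Dict String Int) (c : Int) (nums : List String) (v : String)
    (h : c = (d.size : Int) + 1) :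
    (bStep (d, nums) v).1 = (passStep (d, c) v).1 ∧
    (passStep (d, c) v).2 = ((passStep (d, c) v).1.size : Int) + 1 ∧
    (∀ dfin, DExt (passStep (d, c) v).1 dfin →
      (bStep (d, nums) v).2 = nums ++ [entryA v dfin]) := by
  unfold bStep passStep entryA
  by_cases hP : PySem.Str.pyGet? v 0 = some '~' <;>
    simp only [hP, if_true, if_false] <;>
  · by_cases hC : d.contains (if PySem.Str.pyGet? v 0 = some '~' then
        PySem.Str.slice v (some 1) none else v) = true
    all_goals simp only [hP, ite_true, ite_false] at hC
    · refine ⟨by simp [hC], by simp [hC, h], ?_⟩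
      intro dfin hext
      simp only [hC, ite_true] at hext ⊢
      rw [getD_of_dext hext hC]
    · have hC' := Bool.not_eq_true _ |>.mp hC
      refine ⟨by simp [hC', h], ?_, ?_⟩
      · simp only [hC', Bool.false_eq_true, ite_false]
        rw [PySem.Dict.size_insert]
        simp only [hC', Bool.false_eq_true, if_false]
        push_cast
        omega
      · intro dfin hext
        simp only [hC', Bool.false_eq_true, ite_false] at hext ⊢
        rw [getD_of_dext hext (PySem.Dict.contains_insert_self _ _ _)]
        simp [PySem.Dict.getD_insert_self, h]

-- the single-clause invariant: B's inner fold produces A's dict and entries that agree with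
-- A's formatting against any conservative extension of the resulting dict
lemma inner_inv (vars : List String) :
    ∀ (d : PySem.Dict String Int) (c : Int) (nums : List String), c = (d.size : Int) + 1 →
      (vars.foldl bStep (d, nums)).1 = (vars.foldl passStep (d, c)).1 ∧
      (vars.foldl passStep (d, c)).2 = ((vars.foldl passStep (d, c)).1.size : Int) + 1 ∧
      (∀ dfin, DExt (vars.foldl passStep (d, c)).1 dfin →
        (vars.foldl bStep (d, nums)).2 = nums ++ vars.map (fun v => entryA v dfin)) := by
  induction vars with
  | nil =>
      intro d c nums h
      exact ⟨rfl, h, fun dfin _ => by simp⟩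
  | cons v vs ih =>
      intro d c nums h
      obtain ⟨h1, h2, h3⟩ := bStep_spec d c nums v h
      have hpair : bStep (d, nums) v = ((passStep (d, c) v).1, (bStep (d, nums) v).2) :=
        Prod.ext_iff.mpr ⟨h1, rfl⟩
      obtain ⟨ih1, ih2, ih3⟩ :=
        ih (passStep (d, c) v).1 (passStep (d, c) v).2 ((bStep (d, nums) v).2) h2
      refine ⟨?_, ?_, ?_⟩
      · simp only [List.foldl_cons]
        rw [hpair]
        exact ih1
      · simp only [List.foldl_cons]
        exact ih2
      · intro dfin hext
        have hext' : DExt (vs.foldl passStep (passStep (d, c) v)).1 dfin := by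
          simpa only [List.foldl_cons] using hext
        have hext0 : DExt (passStep (d, c) v).1 dfin :=
          dext_trans (dext_foldl_clause vs _) hext'
            (fun k hk => contains_foldl_clause vs _ k hk)
        have htail := ih3 dfin hext'
        simp only [List.foldl_cons]
        rw [hpair, htail, h3 dfin hext0]
        simp

-- the main invariant over the clause list
lemma main_inv (cs : List (List String)) :
    ∀ (d : PySem.Dict String Int) (c : Int) (ls : List String), c = (d.size : Int) + 1 →
      (cs.foldl bClause (d, ls)).1 = (cs.foldl (fun st cl => cl.foldl passStep st) (d, c)).1 ∧
      (cs.foldl (fun st cl => cl.foldl passStep st) (d, c)).2 =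
        ((cs.foldl (fun st cl => cl.foldl passStep st) (d, c)).1.size : Int) + 1 ∧
      (∀ dfin, DExt (cs.foldl (fun st cl => cl.foldl passStep st) (d, c)).1 dfin →
        (cs.foldl bClause (d, ls)).2 = ls ++ cs.map (fun cl => clause2str cl dfin)) := by
  induction cs with
  | nil =>
      intro d c ls h
      exact ⟨rfl, h, fun dfin _ => by simp⟩
  | cons cl cs ih =>
      intro d c ls h
      obtain ⟨h1, h2, h3⟩ := inner_inv cl d c [] h
      have hbc : bClause (d, ls) cl =
          ((cl.foldl passStep (d, c)).1,
            ls ++ [PySem.Str.join " " ((cl.foldl bStep (d, ([] : List String))).2 ++ ["0"])]) := by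
        unfold bClause
        exact Prod.ext_iff.mpr ⟨h1, rfl⟩
      obtain ⟨ih1, ih2, ih3⟩ :=
        ih (cl.foldl passStep (d, c)).1 (cl.foldl passStep (d, c)).2
          (ls ++ [PySem.Str.join " " ((cl.foldl bStep (d, ([] : List String))).2 ++ ["0"])]) h2
      refine ⟨?_, ?_, ?_⟩
      · simp only [List.foldl_cons]
        rw [hbc]
        exact ih1
      · simp only [List.foldl_cons]
        exact ih2
      · intro dfin hext
        have hext' : DExt ((cs.foldl (fun st cl => cl.foldl passStep st)
            (cl.foldl passStep (d, c))).1) dfin := by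
          simpa only [List.foldl_cons] using hext
        have hext0 : DExt (cl.foldl passStep (d, c)).1 dfin :=
          dext_trans (dext_foldl_clauses cs (cl.foldl passStep (d, c))) hext'
            (fun k hk => contains_foldl_clauses cs (cl.foldl passStep (d, c)) k hk)
        have hline := h3 dfin hext0
        simp only [List.foldl_cons]
        rw [hbc]
        rw [ih3 dfin hext', hline]
        simp [clause2str_eq_map]

-- ===== VERDICT (by name: the statement is the Claim_ definition above) =====
theorem makecnf_spec : Claim_equal_makecnf := by
  intro clauses _ _
  unfold Spec_makecnf makecnf makecnf_alt
  dsimp only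
  obtain ⟨h1, _, h3⟩ := main_inv clauses PySem.Dict.empty 1 [] (by simp)
  have hlines := h3 _ (dext_refl _)
  rw [PySem.List.foldl_append_singleton_eq_map, h1, hlines]
  rfl
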